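-- pv_equiv track=rewrite | github.com/aubrey-zyx/Leetcode | Array/1508_Range Sum of Sorted Subarray Sums.py | rangeSum
-- ===== SOURCE A (Python) =====
-- from typing import List
--
-- def rangeSum(nums: List[int], n: int, left: int, right: int) -> int:
--     subarray_sums = []
--     n = len(nums)
--     for i in range(n):
--         total = 0
--         for j in range(i, n):
--             total += nums[j]
--             subarray_sums.append(total)
--     subarray_sums.sort()
--     res = 0
--     mod = 10 ** 9 + 7
--     for i in range(left - 1, right):
--         res = (res + subarray_sums[i]) % mod
--     return res
-- ===== SOURCE B (Python) =====
-- from typing import List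
--
-- def rangeSum(nums: List[int], n: int, left: int, right: int) -> int:
--     n = len(nums)
--     prefix = [0]
--     for x in nums:
--         prefix.append(prefix[-1] + x)
--     counts = {}
--     for i in range(n):
--         for j in range(i + 1, n + 1):
--             s = prefix[j] - prefix[i]
--             counts[s] = counts.get(s, 0) + 1
--     lo, hi = left - 1, right
--     res = 0
--     pos = 0
--     for v in sorted(counts):
--         c = counts[v]
--         ov = min(hi, pos + c) - max(lo, pos)
--         if ov > 0:
--             res += v * ov
--         pos += c
--     return res % (10 ** 9 + 7)
-- ===== Notes on version B (the rewrite author's own statement) =====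
-- stated objective: alternative
-- what changed: B never materializes or sorts the list of all n(n+1)/2 subarray sums: it tallies each prefix-difference sum into a dict of multiplicities, sorts only the distinct values, and accumulates each value times the overlap of its rank interval with [left-1, right); the hinted binary-search-on-value counting was not used because it requires non-negative elements, which the domain does not guarantee.
-- intended difference: On inputs with left <= 0 whose indices still fall in Python range (-(m) <= left-1, right <= m, m = n(n+1)/2, non-empty index range) and at least one nonzero element, A's negative indices wrap around and re-add the largest subarray sums, while B reads left-1..right-1 as a 1-based rank window clamped at rank 0, the intended meaning; e.g. for ([1],1,0,1) A returns 2 and B returns 1. — e.g. on rangeSum([1], 1, 0, 1): A returns 2, B returns 1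
import Mathlib
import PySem

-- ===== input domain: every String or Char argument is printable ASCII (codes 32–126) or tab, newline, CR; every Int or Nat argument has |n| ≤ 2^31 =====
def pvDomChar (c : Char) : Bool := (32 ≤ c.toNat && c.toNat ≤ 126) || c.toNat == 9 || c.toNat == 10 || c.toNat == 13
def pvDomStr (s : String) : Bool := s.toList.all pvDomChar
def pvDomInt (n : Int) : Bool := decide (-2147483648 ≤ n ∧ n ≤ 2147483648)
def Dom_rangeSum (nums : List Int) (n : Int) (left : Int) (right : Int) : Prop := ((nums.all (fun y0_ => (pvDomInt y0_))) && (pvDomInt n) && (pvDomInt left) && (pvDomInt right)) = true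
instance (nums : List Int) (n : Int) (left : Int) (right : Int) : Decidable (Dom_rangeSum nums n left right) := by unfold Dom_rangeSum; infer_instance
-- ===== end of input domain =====

-- B tallies prefix-difference subarray sums into a dict of multiplicities and walks the sorted
-- DISTINCT values with rank-interval overlap arithmetic, instead of A's materializing and sorting
-- all n(n+1)/2 sums and indexing a slice; same asymptotic cost, genuinely different aggregation.

-- ===== PORT A =====
def rangeSum (nums : List Int) (n : Int) (left : Int) (right : Int) : Int :=
  let n : Int := nums.length
  let subarray_sums : List Int :=
    (PySem.List.pyRange 0 n 1).foldl (fun acc i =>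
      ((PySem.List.pyRange i n 1).foldl
        (fun (p : Int × List Int) j =>
          let total := p.1 + PySem.List.pyGetD nums j 0
          (total, p.2 ++ [total]))
        (0, acc)).2) []
  let ss := PySem.List.sorted subarray_sums (fun x => x) false
  (PySem.List.pyRange (left - 1) right 1).foldl
    (fun res i => PySem.Int.mod (res + PySem.List.pyGetD ss i 0) (10 ^ 9 + 7)) 0

-- ===== PORT B =====
def rangeSum_alt (nums : List Int) (n : Int) (left : Int) (right : Int) : Int :=
  let n : Int := nums.length
  let pref : List Int := nums.foldl (fun p x => p ++ [PySem.List.pyGetD p (-1) 0 + x]) [(0 : Int)]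
  let counts : PySem.Dict Int Int :=
    (PySem.List.pyRange 0 n 1).foldl (fun d i =>
      (PySem.List.pyRange (i + 1) (n + 1) 1).foldl (fun d j =>
        let s := PySem.List.pyGetD pref j 0 - PySem.List.pyGetD pref i 0
        d.insert s (d.getD s 0 + 1)) d) PySem.Dict.empty
  let lo := left - 1
  let hi := right
  let p := (PySem.List.sorted counts.keys (fun x => x) false).foldl
    (fun (p : Int × Int) v =>
      let c := counts.getD v 0
      let ov := min hi (p.1 + c) - max lo p.1
      (p.1 + c, if 0 < ov then p.2 + v * ov else p.2)) (0, 0)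
  PySem.Int.mod p.2 (10 ^ 9 + 7)

-- ===== PRECONDITION & SPEC =====
-- Pre_ excludes exactly the inputs where A's final indexing loop raises IndexError (some index of
-- range(left-1, right) outside [-m, m) for m = n(n+1)/2 subarray sums); B is total but A raises there.
def Pre_rangeSum (nums : List Int) (n : Int) (left : Int) (right : Int) : Prop :=
  right ≤ left - 1 ∨
    (-(((nums.length * (nums.length + 1)) / 2 : Nat) : Int) ≤ left - 1 ∧
      right ≤ (((nums.length * (nums.length + 1)) / 2 : Nat) : Int))
instance (nums : List Int) (n : Int) (left : Int) (right : Int) : Decidable (Pre_rangeSum nums n left right) := by unfold Pre_rangeSum; infer_instance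

def pvWitness_rangeSum : List Int × Int × Int × Int := ([1, 2, 3], 3, 2, 5)

-- On inputs with left ≤ 0 whose indices are still in Python range (non-empty index range,
-- -m ≤ left-1, right ≤ m for m = n(n+1)/2) and some nonzero element, A's negative indices wrap
-- around and re-add the largest subarray sums, while B reads left-1..right-1 as a 1-based rank
-- window clamped at rank 0, the intended meaning.
def D_rangeSum (nums : List Int) (n : Int) (left : Int) (right : Int) : Prop :=
  ¬ right ≤ left - 1 ∧ left - 1 < 0 ∧
    -(((nums.length * (nums.length + 1)) / 2 : Nat) : Int) ≤ left - 1 ∧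
    right ≤ (((nums.length * (nums.length + 1)) / 2 : Nat) : Int) ∧
    ∃ x ∈ nums, x ≠ 0
instance (nums : List Int) (n : Int) (left : Int) (right : Int) : Decidable (D_rangeSum nums n left right) := by unfold D_rangeSum; infer_instance

def Spec_rangeSum (nums : List Int) (n : Int) (left : Int) (right : Int) (out : Int) : Prop := ¬ D_rangeSum nums n left right → out = rangeSum_alt nums n left right
instance (nums : List Int) (n : Int) (left : Int) (right : Int) (out : Int) : Decidable (Spec_rangeSum nums n left right out) := by unfold Spec_rangeSum; infer_instance

def pvDiffWitness_rangeSum : List Int × Int × Int × Int := ([1], 1, 0, 1)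
def pvDiffWitnessOut_rangeSum : Int × Int := (2, 1)

-- ===== CLAIM (what is proved, stated in full; the proofs are below) =====
def Claim_unchanged_rangeSum : Prop := ∀ (nums : List Int) (n : Int) (left : Int) (right : Int), Dom_rangeSum nums n left right → Pre_rangeSum nums n left right → Spec_rangeSum nums n left right (rangeSum nums n left right)
def Claim_changed_rangeSum : Prop := Dom_rangeSum (pvDiffWitness_rangeSum.1) (pvDiffWitness_rangeSum.2.1) (pvDiffWitness_rangeSum.2.2.1) (pvDiffWitness_rangeSum.2.2.2) ∧ Pre_rangeSum (pvDiffWitness_rangeSum.1) (pvDiffWitness_rangeSum.2.1) (pvDiffWitness_rangeSum.2.2.1) (pvDiffWitness_rangeSum.2.2.2) ∧ D_rangeSum (pvDiffWitness_rangeSum.1) (pvDiffWitness_rangeSum.2.1) (pvDiffWitness_rangeSum.2.2.1) (pvDiffWitness_rangeSum.2.2.2) ∧ rangeSum (pvDiffWitness_rangeSum.1) (pvDiffWitness_rangeSum.2.1) (pvDiffWitness_rangeSum.2.2.1) (pvDiffWitness_rangeSum.2.2.2) = pvDiffWitnessOut_rangeSum.1 ∧ rangeSum_alt (pvDiffWitness_rangeSum.1)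 (pvDiffWitness_rangeSum.2.1) (pvDiffWitness_rangeSum.2.2.1) (pvDiffWitness_rangeSum.2.2.2) = pvDiffWitnessOut_rangeSum.2 ∧ pvDiffWitnessOut_rangeSum.1 ≠ pvDiffWitnessOut_rangeSum.2

-- ===== LEMMAS AND PROOFS =====

-- prefix sum of the first k elements of nums
def pvT (nums : List Int) (k : Nat) : Int := (nums.take k).sum

-- canonical form of the list of all subarray sums, row by row
def pvAll (nums : List Int) : List Int :=
  (PySem.List.pyRange 0 (nums.length : Int) 1).flatMap (fun i =>
    (PySem.List.pyRange (i + 1) ((nums.length : Int) + 1) 1).map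
      (fun j => pvT nums j.toNat - pvT nums i.toNat))

-- running partial sums of l starting from s
def pvScan (s : Int) : List Int → List Int
  | [] => []
  | x :: t => (s + x) :: pvScan (s + x) t

theorem pvScan_eq (l : List Int) : ∀ (s : Int),
    pvScan s l = (List.range l.length).map (fun k => s + (l.take (k + 1)).sum) := by
  induction l with
  | nil => intro s; simp [pvScan]
  | cons x t ih =>
    intro s
    simp only [pvScan, ih (s + x), List.length_cons, List.range_succ_eq_map,
      List.map_cons, List.map_map]
    congr 1
    · simp
    · apply List.map_congr_left
      intro k _
      simp [List.take_succ_cons, add_assoc]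

theorem pvBuild_pre (l : List Int) : ∀ (p : List Int) (s : Int),
    PySem.List.pyGetD p (-1) 0 = s →
    l.foldl (fun p x => p ++ [PySem.List.pyGetD p (-1) 0 + x]) p = p ++ pvScan s l := by
  induction l with
  | nil => intro p s _; simp [pvScan]
  | cons x t ih =>
    intro p s hs
    simp only [List.foldl_cons, hs]
    rw [ih (p ++ [s + x]) (s + x) (PySem.List.pyGetD_neg_one_append_singleton p (s + x) 0)]
    simp [pvScan]

theorem pvPre_eq (nums : List Int) :
    nums.foldl (fun p x => p ++ [PySem.List.pyGetD p (-1) 0 + x]) [(0 : Int)]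
      = (List.range (nums.length + 1)).map (fun k => pvT nums k) := by
  rw [pvBuild_pre nums [(0 : Int)] 0 (by rfl)]
  rw [pvScan_eq]
  simp only [List.range_succ_eq_map, List.map_cons, List.map_map,
    List.singleton_append]
  congr 1
  apply List.map_congr_left
  intro k _
  simp [pvT]

theorem pvPre_get (nums : List Int) (j : Int) (h0 : 0 ≤ j) (h1 : j ≤ (nums.length : Int)) :
    PySem.List.pyGetD
        (nums.foldl (fun p x => p ++ [PySem.List.pyGetD p (-1) 0 + x]) [(0 : Int)]) j 0
      = pvT nums j.toNat := by
  rw [pvPre_eq]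
  rw [PySem.List.pyGetD_eq_getElem _ 0 h0 (by simp; omega)]
  simp

theorem pvT_step (nums : List Int) (a : Int) (h0 : 0 ≤ a) (h1 : a < (nums.length : Int)) :
    pvT nums (a.toNat + 1) = pvT nums a.toNat + PySem.List.pyGetD nums a 0 := by
  rw [PySem.List.pyGetD_eq_getElem _ 0 h0 h1]
  have ha : a.toNat < nums.length := by omega
  unfold pvT
  exact List.sum_take_succ nums a.toNat ha

theorem pvInnerA (nums : List Int) (i : Int) :
    ∀ (k : Nat) (a : Int), a + k = (nums.length : Int) → 0 ≤ a → ∀ (acc : List Int),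
    (PySem.List.pyRange a (nums.length : Int) 1).foldl
        (fun (p : Int × List Int) j =>
          (p.1 + PySem.List.pyGetD nums j 0, p.2 ++ [p.1 + PySem.List.pyGetD nums j 0]))
        (pvT nums a.toNat - pvT nums i.toNat, acc)
      = (pvT nums nums.length - pvT nums i.toNat,
         acc ++ (PySem.List.pyRange (a + 1) ((nums.length : Int) + 1) 1).map
           (fun j => pvT nums j.toNat - pvT nums i.toNat)) := by
  intro k
  induction k with
  | zero =>
    intro a ha h0 acc
    have he : a = (nums.length : Int) := by omega
    subst he
    rw [PySem.List.pyRange_one_eq_nil (le_refl _),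
        PySem.List.pyRange_one_eq_nil (by omega)]
    simp
  | succ k ih =>
    intro a ha h0 acc
    have hlt : a < (nums.length : Int) := by omega
    rw [PySem.List.pyRange_one_cons hlt]
    simp only [List.foldl_cons]
    have hstep : pvT nums a.toNat - pvT nums i.toNat + PySem.List.pyGetD nums a 0
        = pvT nums (a + 1).toNat - pvT nums i.toNat := by
      have : (a + 1).toNat = a.toNat + 1 := by omega
      rw [this, pvT_step nums a h0 hlt]; ring
    rw [hstep]
    rw [ih (a + 1) (by omega) (by omega) (acc ++ [pvT nums (a + 1).toNat - pvT nums i.toNat])]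
    conv_rhs => rw [PySem.List.pyRange_one_cons (show a + 1 < (nums.length : Int) + 1 by omega)]
    simp

theorem pvFlatMap_congr {α β : Type} (l : List α) (f g : α → List β)
    (h : ∀ x ∈ l, f x = g x) : l.flatMap f = l.flatMap g := by
  induction l with
  | nil => rfl
  | cons x t ih =>
    simp only [List.flatMap_cons]
    rw [h x (List.mem_cons_self), ih (fun y hy => h y (List.mem_cons_of_mem x hy))]

theorem pvAlist (nums : List Int) :
    (PySem.List.pyRange 0 (nums.length : Int) 1).foldl (fun acc i =>
        ((PySem.List.pyRange i (nums.length : Int) 1).foldl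
          (fun (p : Int × List Int) j =>
            (p.1 + PySem.List.pyGetD nums j 0, p.2 ++ [p.1 + PySem.List.pyGetD nums j 0]))
          (0, acc)).2) []
      = pvAll nums := by
  rw [PySem.List.foldl_congr_mem
    (g := fun acc i => acc ++ (PySem.List.pyRange (i + 1) ((nums.length : Int) + 1) 1).map
      (fun j => pvT nums j.toNat - pvT nums i.toNat))]
  · exact PySem.List.foldl_append_eq_flatMap _ _ _
  · intro acc i hi
    have hm := (PySem.List.mem_pyRange_one).1 hi
    have h := pvInnerA nums i ((nums.length : Int) - i).toNat i (by omega) (by omega) acc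
    rw [sub_self] at h
    exact congrArg Prod.snd h

theorem pvBlist (nums : List Int) :
    (PySem.List.pyRange 0 (nums.length : Int) 1).flatMap (fun i =>
        (PySem.List.pyRange (i + 1) ((nums.length : Int) + 1) 1).map (fun j =>
          PySem.List.pyGetD
            (nums.foldl (fun p x => p ++ [PySem.List.pyGetD p (-1) 0 + x]) [(0 : Int)]) j 0
          - PySem.List.pyGetD
            (nums.foldl (fun p x => p ++ [PySem.List.pyGetD p (-1) 0 + x]) [(0 : Int)]) i 0))
      = pvAll nums := by
  apply pvFlatMap_congr
  intro i hi
  have hm := (PySem.List.mem_pyRange_one).1 hi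
  apply List.map_congr_left
  intro j hj
  have hmj := (PySem.List.mem_pyRange_one).1 hj
  rw [pvPre_get nums j (by omega) (by omega), pvPre_get nums i (by omega) (by omega)]

theorem pvFold_mod (xs : List Int) (f : Int → Int) : ∀ (r : Int),
    xs.foldl (fun res i => PySem.Int.mod (res + f i) (10 ^ 9 + 7)) (PySem.Int.mod r (10 ^ 9 + 7))
      = PySem.Int.mod (xs.foldl (fun s i => s + f i) r) (10 ^ 9 + 7) := by
  induction xs with
  | nil => intro r; rfl
  | cons x t ih =>
    intro r
    simp only [List.foldl_cons]
    rw [← ih (r + f x)]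
    congr 1
    rw [PySem.Int.mod_eq_emod_of_pos (by norm_num),
        PySem.Int.mod_eq_emod_of_pos (by norm_num),
        PySem.Int.mod_eq_emod_of_pos (by norm_num)]
    exact Int.emod_add_emod r (10 ^ 9 + 7) (f x)

-- the slice-sum both programs compute: sum of s[max a 0 : b] (b measured from the same origin)
def pvSlice (s : List Int) (a b : Int) : Int :=
  ((s.drop (max a 0).toNat).take (b - max a 0).toNat).sum

theorem pvSlice_nil (a b : Int) : pvSlice [] a b = 0 := by simp [pvSlice]

theorem pvSlice_zero_of_le (s : List Int) (a b : Int) (h : b - max a 0 ≤ 0) :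
    pvSlice s a b = 0 := by
  have : (b - max a 0).toNat = 0 := by omega
  simp [pvSlice, this]

theorem pvSlice_cons (x : Int) (l : List Int) (a b : Int) :
    pvSlice (x :: l) a b = (if a ≤ 0 ∧ 0 < b then x else 0) + pvSlice l (a - 1) (b - 1) := by
  by_cases ha : a ≤ 0
  · have h1 : max a 0 = 0 := by omega
    have h2 : max (a - 1) 0 = 0 := by omega
    by_cases hb : 0 < b
    · simp only [pvSlice, h1, h2, Int.toNat_zero, List.drop_zero]
      rw [show (b - 0).toNat = (b - 1 - 0).toNat + 1 from by omega, List.take_succ_cons,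
        List.sum_cons, if_pos ⟨ha, hb⟩]
    · simp only [pvSlice, h1, h2, Int.toNat_zero, List.drop_zero]
      rw [show (b - 0).toNat = 0 from by omega, show (b - 1 - 0).toNat = 0 from by omega]
      simp [hb]
  · have h1 : max a 0 = a := by omega
    have h2 : max (a - 1) 0 = a - 1 := by omega
    simp only [pvSlice, h1, h2]
    rw [show a.toNat = (a - 1).toNat + 1 from by omega, List.drop_succ_cons,
      show (b - a).toNat = (b - 1 - (a - 1)).toNat from by omega, if_neg (by omega)]
    rw [zero_add]

theorem pvSlice_replicate_append (v : Int) (t : List Int) :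
    ∀ (c : Nat) (a b : Int),
    pvSlice (List.replicate c v ++ t) a b
      = v * max 0 (min b (c : Int) - max a 0) + pvSlice t (a - c) (b - c) := by
  intro c
  induction c with
  | zero =>
    intro a b
    simp only [List.replicate_zero, List.nil_append, Nat.cast_zero, sub_zero]
    rw [show max 0 (min b (0 : Int) - max a 0) = 0 from by omega, mul_zero, zero_add]
  | succ c ih =>
    intro a b
    have hrep : List.replicate (c + 1) v ++ t = v :: (List.replicate c v ++ t) := by
      simp [List.replicate_succ]
    rw [hrep, pvSlice_cons, ih (a - 1) (b - 1)]
    have hargs1 : a - 1 - c = a - (c + 1 : Nat) := by push_cast; ring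
    have hargs2 : b - 1 - c = b - (c + 1 : Nat) := by push_cast; ring
    rw [hargs1, hargs2]
    by_cases h : a ≤ 0 ∧ 0 < b
    · have hx : max 0 (min b ((c : Int) + 1) - max a 0)
          = max 0 (min (b - 1) (c : Int) - max (a - 1) 0) + 1 := by omega
      simp only [if_pos h]
      push_cast
      rw [hx]; ring
    · have hx : max 0 (min b ((c : Int) + 1) - max a 0)
          = max 0 (min (b - 1) (c : Int) - max (a - 1) 0) := by omega
      simp only [if_neg h]
      push_cast
      rw [hx]; ring

-- a sorted list with minimum v splits into its run of v's followed by the rest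
theorem pvSorted_split (v : Int) : ∀ (s : List Int), s.Pairwise (· ≤ ·) →
    (∀ x ∈ s, v ≤ x) →
    s = List.replicate (s.count v) v ++ s.filter (fun x => x ≠ v) := by
  intro s
  induction s with
  | nil => intro _ _; rfl
  | cons x s' ih =>
    intro hp hmin
    rcases List.pairwise_cons.1 hp with ⟨hx, hp'⟩
    by_cases hxv : x = v
    · subst hxv
      have : (x :: s').count x = s'.count x + 1 := List.count_cons_self
      rw [this]
      have hf : (x :: s').filter (fun y => y ≠ x) = s'.filter (fun y => y ≠ x) := by
        simp
      rw [hf, List.replicate_succ, List.cons_append]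
      congr 1
      exact ih hp' (fun y hy => hmin y (List.mem_cons_of_mem x hy))
    · have hvx : v < x := lt_of_le_of_ne (hmin x List.mem_cons_self) (fun h => hxv h.symm)
      have hnv : v ∉ x :: s' := by
        intro hv
        rcases List.mem_cons.1 hv with h | h
        · exact hxv h.symm
        · exact absurd (hx v h) (not_le.2 hvx)
      have hc : (x :: s').count v = 0 := List.count_eq_zero.2 hnv
      have hf : (x :: s').filter (fun y => y ≠ v) = x :: s' := by
        apply List.filter_eq_self.2
        intro y hy
        simp only [ne_eq, decide_eq_true_eq]
        intro he
        exact hnv (he ▸ hy)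
      rw [hc, hf]
      rfl

-- the rank walk over distinct sorted values computes the slice-sum of the sorted list
theorem pvWalk (cnt : Int → Int) (lo hi : Int) :
    ∀ (ks : List Int), ks.Pairwise (· < ·) →
    ∀ (s : List Int), s.Pairwise (· ≤ ·) → (∀ x, x ∈ ks ↔ x ∈ s) →
    (∀ v ∈ ks, cnt v = (s.count v : Int)) →
    ∀ (pos res : Int),
    ks.foldl (fun (p : Int × Int) v =>
        (p.1 + cnt v,
         if 0 < min hi (p.1 + cnt v) - max lo p.1
         then p.2 + v * (min hi (p.1 + cnt v) - max lo p.1) else p.2))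
      (pos, res)
      = (pos + s.length, res + pvSlice s (lo - pos) (hi - pos)) := by
  intro ks
  induction ks with
  | nil =>
    intro _ s _ hmem _ pos res
    have hs : s = [] := by
      cases s with
      | nil => rfl
      | cons y t => exact absurd ((hmem y).2 List.mem_cons_self) (List.not_mem_nil)
    subst hs
    simp [pvSlice_nil]
  | cons v ks' ih =>
    intro hkp s hsp hmem hcnt pos res
    rcases List.pairwise_cons.1 hkp with ⟨hvlt, hkp'⟩
    have hvs : v ∈ s := (hmem v).1 List.mem_cons_self
    have hmin : ∀ x ∈ s, v ≤ x := by
      intro x hx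
      rcases List.mem_cons.1 ((hmem x).2 hx) with h | h
      · exact le_of_eq h.symm
      · exact le_of_lt (hvlt x h)
    have hsplit := pvSorted_split v s hsp hmin
    set c : Nat := s.count v with hc
    set t : List Int := s.filter (fun x => x ≠ v) with ht
    have htp : t.Pairwise (· ≤ ·) := List.Pairwise.filter _ hsp
    have htmem : ∀ x, x ∈ ks' ↔ x ∈ t := by
      intro x
      constructor
      · intro hx
        have hxs : x ∈ s := (hmem x).1 (List.mem_cons_of_mem v hx)
        have hxv : x ≠ v := ne_of_gt (hvlt x hx)
        rw [ht, List.mem_filter]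
        exact ⟨hxs, by simp [hxv]⟩
      · intro hx
        rw [ht, List.mem_filter] at hx
        have hxv : x ≠ v := by simpa using hx.2
        rcases List.mem_cons.1 ((hmem x).2 hx.1) with h | h
        · exact absurd h hxv
        · exact h
    have htcnt : ∀ v' ∈ ks', cnt v' = (t.count v' : Int) := by
      intro v' hv'
      have hne : v' ≠ v := ne_of_gt (hvlt v' hv')
      have := hcnt v' (List.mem_cons_of_mem v hv')
      rw [this]
      congr 1
      conv_lhs => rw [hsplit]
      rw [List.count_append, List.count_replicate]
      simp only [beq_iff_eq]
      rw [if_neg (Ne.symm hne), Nat.zero_add]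
    have hcv : cnt v = (c : Int) := hcnt v List.mem_cons_self
    simp only [List.foldl_cons]
    rw [ih hkp' t htp htmem htcnt]
    have hlen : (s.length : Int) = (c : Int) + t.length := by
      conv_lhs => rw [hsplit]
      simp
    have hargs1 : lo - pos - c = lo - (pos + cnt v) := by rw [hcv]; ring
    have hargs2 : hi - pos - c = hi - (pos + cnt v) := by rw [hcv]; ring
    have hslice : pvSlice s (lo - pos) (hi - pos)
        = v * max 0 (min (hi - pos) (c : Int) - max (lo - pos) 0)
          + pvSlice t (lo - (pos + cnt v)) (hi - (pos + cnt v)) := by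
      conv_lhs => rw [hsplit]
      rw [pvSlice_replicate_append, hargs1, hargs2]
    have hov : min hi (pos + cnt v) - max lo pos
        = min (hi - pos) (c : Int) - max (lo - pos) 0 := by rw [hcv]; omega
    rw [Prod.mk.injEq]
    refine ⟨?_, ?_⟩
    · simp only [hcv, hlen]; ring
    · rw [hslice]
      by_cases h : 0 < min hi (pos + cnt v) - max lo pos
      · rw [if_pos h]
        have : max 0 (min (hi - pos) (c : Int) - max (lo - pos) 0)
            = min hi (pos + cnt v) - max lo pos := by omega
        rw [this]; ring
      · rw [if_neg h]
        have : max 0 (min (hi - pos) (c : Int) - max (lo - pos) 0) = 0 := by omega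
        rw [this]; ring

-- A's indexing fold over range(lo, hi) is the slice-sum, for in-range bounds
theorem pvFoldRange (s : List Int) (lo hi : Int) (h0 : 0 ≤ lo) (h1 : hi ≤ (s.length : Int)) :
    (PySem.List.pyRange lo hi 1).foldl (fun res k => res + PySem.List.pyGetD s k 0) 0
      = pvSlice s lo hi := by
  have hsum : ∀ (l : List Int) (r : Int), l.foldl (fun a b => a + b) r = r + l.sum := by
    intro l
    induction l with
    | nil => intro r; simp
    | cons x t ih => intro r; simp only [List.foldl_cons, ih, List.sum_cons]; ring
  by_cases hlt : lo < hi
  · have htake : ∀ k ∈ PySem.List.pyRange lo hi 1,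
        PySem.List.pyGetD s k 0 = PySem.List.pyGetD (s.take hi.toNat) k 0 := by
      intro k hk
      have hm := (PySem.List.mem_pyRange_one).1 hk
      rw [PySem.List.pyGetD_eq_getElem s 0 (by omega) (by omega),
          PySem.List.pyGetD_eq_getElem (s.take hi.toNat) 0 (by omega)
            (by simp only [List.length_take]; omega)]
      simp
    rw [PySem.List.foldl_congr_mem _ _
      (fun res k => res + PySem.List.pyGetD (s.take hi.toNat) k 0) _
      (fun acc k hk => by rw [htake k hk])]
    have h2 : (((s.take hi.toNat).length : Nat) : Int) = hi := by simp; omega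
    have hmain := PySem.List.foldl_pyRange_pyGetD' (s.take hi.toNat) 0
      (fun a b => a + b) 0 (a := lo) h0
    rw [h2] at hmain
    refine Eq.trans (by exact hmain) ?_
    rw [hsum, List.drop_take]
    unfold pvSlice
    rw [show max lo 0 = lo from by omega,
      show (hi - lo).toNat = hi.toNat - lo.toNat from by omega]
    ring
  · rw [PySem.List.pyRange_one_eq_nil (by omega)]
    rw [pvSlice_zero_of_le s lo hi (by omega)]
    rfl

-- number of subarray sums
theorem pvAll_length (nums : List Int) :
    (pvAll nums).length = nums.length * (nums.length + 1) / 2 := by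
  have hadd : ∀ (l : List Int) (g : Int → Nat),
      (l.map (fun i => g i + 1)).sum = (l.map g).sum + l.length := by
    intro l g
    induction l with
    | nil => rfl
    | cons x t ih => simp only [List.map_cons, List.sum_cons, List.length_cons, ih]; omega
  have key : ∀ (N : Nat),
      ((PySem.List.pyRange 0 (N : Int) 1).map (fun i => ((N : Int) - i).toNat)).sum
        = N * (N + 1) / 2 := by
    intro N
    induction N with
    | zero => rfl
    | succ N ih =>
      have hsplit : PySem.List.pyRange 0 ((N + 1 : Nat) : Int) 1
          = PySem.List.pyRange 0 (N : Int) 1 ++ [(N : Int)] := by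
        push_cast
        exact PySem.List.pyRange_one_succ_right (by positivity)
      rw [hsplit, List.map_append, List.sum_append]
      have hcongr : (PySem.List.pyRange 0 (N : Int) 1).map
            (fun i => (((N + 1 : Nat) : Int) - i).toNat)
          = (PySem.List.pyRange 0 (N : Int) 1).map (fun i => ((N : Int) - i).toNat + 1) := by
        apply List.map_congr_left
        intro i hi
        have := (PySem.List.mem_pyRange_one).1 hi
        omega
      rw [hcongr, hadd, ih]
      simp only [List.map_cons, List.map_nil, List.sum_cons, List.sum_nil,
        PySem.List.length_pyRange_one]
      have h2 : (N + 1) * (N + 1 + 1) = N * (N + 1) + 2 * (N + 1) := by ring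
      omega
  unfold pvAll
  rw [List.length_flatMap]
  have hrow : ∀ i ∈ PySem.List.pyRange 0 (nums.length : Int) 1,
      ((PySem.List.pyRange (i + 1) ((nums.length : Int) + 1) 1).map
        (fun j => pvT nums j.toNat - pvT nums i.toNat)).length
      = ((nums.length : Int) - i).toNat := by
    intro i hi
    rw [List.length_map, PySem.List.length_pyRange_one]
    congr 1
    omega
  rw [List.map_congr_left hrow]
  exact key nums.length

-- B's dict is the multiset of all subarray sums
theorem pvCounts (nums : List Int) :
    (PySem.List.pyRange 0 (nums.length : Int) 1).foldl (fun d i =>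
        (PySem.List.pyRange (i + 1) ((nums.length : Int) + 1) 1).foldl (fun d j =>
          let s := PySem.List.pyGetD
              (nums.foldl (fun p x => p ++ [PySem.List.pyGetD p (-1) 0 + x]) [(0 : Int)]) j 0
            - PySem.List.pyGetD
              (nums.foldl (fun p x => p ++ [PySem.List.pyGetD p (-1) 0 + x]) [(0 : Int)]) i 0
          d.insert s (d.getD s 0 + 1)) d) PySem.Dict.empty
      = PySem.Dict.counter (pvAll nums) := by
  have hflat : ∀ (l : List Int) (row : Int → List Int)
      (g : PySem.Dict Int Int → Int → PySem.Dict Int Int) (init : PySem.Dict Int Int),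
      l.foldl (fun st i => (row i).foldl g st) init = (l.flatMap row).foldl g init := by
    intro l row g
    induction l with
    | nil => intro init; rfl
    | cons x t ih => intro init; simp only [List.flatMap_cons, List.foldl_append, List.foldl_cons, ih]
  have hinner : ∀ (d : PySem.Dict Int Int) (i : Int),
      (PySem.List.pyRange (i + 1) ((nums.length : Int) + 1) 1).foldl (fun d j =>
          let s := PySem.List.pyGetD
              (nums.foldl (fun p x => p ++ [PySem.List.pyGetD p (-1) 0 + x]) [(0 : Int)]) j 0
            - PySem.List.pyGetD
              (nums.foldl (fun p x => p ++ [PySem.List.pyGetD p (-1) 0 + x]) [(0 : Int)]) i 0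
          d.insert s (d.getD s 0 + 1)) d
      = ((PySem.List.pyRange (i + 1) ((nums.length : Int) + 1) 1).map (fun j =>
          PySem.List.pyGetD
              (nums.foldl (fun p x => p ++ [PySem.List.pyGetD p (-1) 0 + x]) [(0 : Int)]) j 0
            - PySem.List.pyGetD
              (nums.foldl (fun p x => p ++ [PySem.List.pyGetD p (-1) 0 + x]) [(0 : Int)]) i 0)).foldl
          (fun d s => d.insert s (d.getD s 0 + 1)) d := by
    intro d i
    rw [List.foldl_map]
  simp only [hinner]
  rw [hflat (PySem.List.pyRange 0 (nums.length : Int) 1) _ (fun d s => d.insert s (d.getD s 0 + 1))]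
  rw [pvBlist nums]
  exact PySem.Dict.foldl_insert_getD_add_one_eq_counter (pvAll nums)

-- every subarray sum of an all-zero list is zero
theorem pvAll_zero (nums : List Int) (hz : ∀ x ∈ nums, x = 0) :
    ∀ y ∈ pvAll nums, y = 0 := by
  intro y hy
  unfold pvAll at hy
  rcases List.mem_flatMap.1 hy with ⟨i, _, hyi⟩
  rcases List.mem_map.1 hyi with ⟨j, _, hj⟩
  have hzk : ∀ k : Nat, pvT nums k = 0 := by
    intro k
    apply List.sum_eq_zero
    intro x hx
    exact hz x (List.mem_of_mem_take hx)
  rw [← hj, hzk, hzk, sub_zero]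

theorem pvGetD_zero (s : List Int) (hz : ∀ x ∈ s, x = 0) (k : Int) :
    PySem.List.pyGetD s k 0 = 0 := by
  unfold PySem.List.pyGetD
  cases hq : PySem.List.pyGet? s k with
  | none => rfl
  | some y => exact hz y (PySem.List.mem_of_pyGet?_eq_some s hq)

-- ===== VERDICT (by name: the statement is the Claim_ definition above) =====
theorem rangeSum_spec : Claim_unchanged_rangeSum := by
  intro nums n left right _ hpre hnd
  unfold Pre_rangeSum at hpre
  unfold D_rangeSum at hnd
  show rangeSum nums n left right = rangeSum_alt nums n left right
  unfold rangeSum rangeSum_alt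
  simp only [pvAlist, pvCounts, PySem.Dict.keys_counter, PySem.Dict.getD_counter]
  set lo : Int := left - 1 with hlo
  set hi : Int := right with hhi
  set s : List Int := PySem.List.sorted (pvAll nums) (fun x => x) false with hs
  have hsperm : s.Perm (pvAll nums) := PySem.List.sorted_perm _ _ _
  have hwalk := pvWalk (fun v => (List.count v (pvAll nums) : Int)) lo hi
    (PySem.List.sorted (PySem.Set.ofList (pvAll nums)) (fun x => x) false)
    (PySem.List.sorted_ofList_pairwise_lt (pvAll nums))
    s
    (PySem.List.sorted_pairwise (pvAll nums) (fun x => x))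
    (by
      intro x
      rw [PySem.List.mem_sorted, PySem.Set.mem_ofList, hs, PySem.List.mem_sorted])
    (by
      intro v _
      exact congrArg _ (hsperm.count_eq v).symm)
    0 0
  rw [hwalk]
  simp only [zero_add, sub_zero]
  have hmod0 : PySem.Int.mod 0 (10 ^ 9 + 7) = 0 := by decide
  have hAfold := pvFold_mod (PySem.List.pyRange lo hi 1) (fun i => PySem.List.pyGetD s i 0) 0
  rw [hmod0] at hAfold
  rw [hAfold]
  have hslen : (s.length : Int) = ((nums.length * (nums.length + 1) / 2 : Nat) : Int) := by
    rw [hs, PySem.List.length_sorted, pvAll_length]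
  by_cases hE : hi ≤ lo
  · rw [PySem.List.pyRange_one_eq_nil (by omega)]
    rw [pvSlice_zero_of_le s lo hi (by omega)]
    rfl
  · have hb : -((nums.length * (nums.length + 1) / 2 : Nat) : Int) ≤ lo ∧
        hi ≤ ((nums.length * (nums.length + 1) / 2 : Nat) : Int) := by
      rcases hpre with h | h
      · exact absurd (by omega : hi ≤ lo) hE
      · exact h
    by_cases hlo0 : 0 ≤ lo
    · rw [pvFoldRange s lo hi hlo0 (by omega)]
    · have hz : ∀ x ∈ nums, x = 0 := by
        by_contra hcon
        push_neg at hcon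
        exact hnd ⟨by omega, by omega, hb.1, hb.2, hcon⟩
      have hzs : ∀ x ∈ s, x = 0 := by
        intro x hx
        exact pvAll_zero nums hz x (hsperm.mem_iff.1 hx)
      have hA0 : ∀ l : List Int,
          l.foldl (fun res i => PySem.Int.mod (res + PySem.List.pyGetD s i 0) (10 ^ 9 + 7)) 0
            = 0 := by
        intro l
        induction l with
        | nil => rfl
        | cons x t ih =>
          rw [List.foldl_cons]
          have h1 : PySem.Int.mod (0 + PySem.List.pyGetD s x 0) (10 ^ 9 + 7) = 0 := by
            rw [pvGetD_zero s hzs, add_zero, hmod0]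
          rw [h1]
          exact ih
      have hB0 : pvSlice s lo hi = 0 := by
        unfold pvSlice
        apply List.sum_eq_zero
        intro x hx
        exact hzs x (List.mem_of_mem_drop (List.mem_of_mem_take hx))
      rw [← hAfold, hA0, hB0, hmod0]

theorem rangeSum_changed : Claim_changed_rangeSum := by
  unfold Claim_changed_rangeSum; decide
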